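-- pv_equiv track=rewrite | github.com/mikigit97/Social_Networks | Ex2.py | roll_over_cliques
-- ===== SOURCE A (Python) =====
-- def roll_over_cliques(G, start_clique, all_cliques, visited,k):
--     """Roll over adjacent cliques starting from a specific 3-clique."""
--     community = set(start_clique)
--     stack = [start_clique]
--     while stack:
--         current_clique = stack.pop()
--         visited.add(tuple(current_clique))
--         # adjacent_cliques = find_adjacent_cliques(current_clique, all_cliques,k)
--         adjacent_cliques = []
--         clique_set = set(current_clique)
--         for other in all_cliques:
--             if len(clique_set.intersection(other)) == k - 1:
--                 adjacent_cliques.append(other)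
--         for adj_clique in adjacent_cliques:
--             if tuple(adj_clique) not in visited:
--                 community.update(adj_clique)
--                 stack.append(adj_clique)
--                 visited.add(tuple(adj_clique))
--     return community
-- ===== SOURCE B (Python) =====
-- def _inverted_index(all_cliques):
--     """vertex -> list of indices of cliques containing it (once per distinct vertex)."""
--     index = {}
--     for i, other in enumerate(all_cliques):
--         for x in set(other):
--             index.setdefault(x, []).append(i)
--     return index
--
--
-- def roll_over_cliques(G, start_clique, all_cliques, visited, k):
--     """Alternative: an inverted index (vertex -> cliques containing it) is built once;
--     each popped clique then gets its overlap sizes with ALL cliques by counting index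
--     postings, instead of computing a pairwise set intersection per clique.
--     Mutates `visited` like the original; same returned set."""
--     index = _inverted_index(all_cliques)
--     community = set(start_clique)
--     stack = [start_clique]
--     while stack:
--         cur = stack.pop()
--         visited.add(tuple(cur))
--         counts = {}
--         for x in set(cur):
--             for i in index.get(x, ()):
--                 counts[i] = counts.get(i, 0) + 1
--         for i, other in enumerate(all_cliques):
--             if counts.get(i, 0) == k - 1 and tuple(other) not in visited:
--                 community.update(other)
--                 stack.append(other)
--                 visited.add(tuple(other))
--     return community
-- ===== Notes on version B (the rewrite author's own statement) =====
-- stated objective: alternative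
-- what changed: B replaces A's per-pop pairwise set intersections with an inverted index (vertex -> indices of cliques containing it) built once; each popped clique gets its overlap size with every clique by counting index postings in a dict, and the collect-then-process pass becomes a single counter-driven pass in the same clique order.
import Mathlib
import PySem

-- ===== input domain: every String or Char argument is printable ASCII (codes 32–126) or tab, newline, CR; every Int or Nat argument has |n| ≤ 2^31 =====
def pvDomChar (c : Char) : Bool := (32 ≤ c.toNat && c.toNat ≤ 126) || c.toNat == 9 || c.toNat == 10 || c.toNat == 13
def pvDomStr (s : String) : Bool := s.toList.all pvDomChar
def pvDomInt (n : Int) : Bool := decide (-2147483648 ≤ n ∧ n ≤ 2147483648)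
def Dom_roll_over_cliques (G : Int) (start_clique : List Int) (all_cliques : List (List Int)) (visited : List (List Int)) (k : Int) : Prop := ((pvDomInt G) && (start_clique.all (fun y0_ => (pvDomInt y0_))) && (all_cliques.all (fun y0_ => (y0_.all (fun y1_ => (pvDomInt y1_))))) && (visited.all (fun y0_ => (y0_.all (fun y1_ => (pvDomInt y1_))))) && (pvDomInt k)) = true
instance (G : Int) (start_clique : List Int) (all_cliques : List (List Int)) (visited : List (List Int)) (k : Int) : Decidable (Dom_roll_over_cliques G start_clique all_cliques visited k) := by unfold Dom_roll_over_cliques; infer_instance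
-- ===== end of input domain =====

-- B replaces A's per-pop pairwise set intersections with an inverted index (vertex -> clique
-- indices) built once and a counting pass per popped clique; same traversal order, same returned
-- set, and the proof is about the RETURN value only (both Pythons also mutate `visited` in
-- place, identically).

-- ===== PORT A =====
-- Python's stack (append/pop at the end) is modelled head-as-top; the fuel all_cliques.length + 1
-- bounds the number of pops (each pop beyond the first was pushed together with a fresh visited tuple).
def pvLoopA (all_cliques : List (List Int)) (k : Int) :
    Nat → PySem.Set Int → List (List Int) → PySem.Set (List Int) → PySem.Set Int
  | 0, community, _, _ => community
  | _ + 1, community, [], _ => community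
  | fuel + 1, community, current_clique :: rest, visited =>
    let visited1 := PySem.Set.add visited current_clique
    -- for other in all_cliques: if len(clique_set.intersection(other)) == k - 1: append(other)
    let adjacent_cliques := all_cliques.foldl (fun acc other =>
        if (((PySem.Set.inter (PySem.Set.ofList current_clique) other).length : Int) == k - 1)
        then acc ++ [other] else acc) []
    -- for adj_clique in adjacent_cliques: if tuple(adj_clique) not in visited: update/append/add
    let st := adjacent_cliques.foldl
      (fun (st : PySem.Set Int × List (List Int) × PySem.Set (List Int)) adj =>
        if PySem.Set.contains st.2.2 adj then st
        else (PySem.Set.update st.1 adj, adj :: st.2.1, PySem.Set.add st.2.2 adj))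
      (community, rest, visited1)
    pvLoopA all_cliques k fuel st.1 st.2.1 st.2.2

def roll_over_cliques (G : Int) (start_clique : List Int) (all_cliques : List (List Int)) (visited : List (List Int)) (k : Int) : List Int :=
  pvLoopA all_cliques k (all_cliques.length + 1) (PySem.Set.ofList start_clique) [start_clique] visited

-- ===== PORT B =====
-- _inverted_index: vertex -> list of indices of cliques containing it (index.setdefault(x, []).append(i))
def pvIndex (all_cliques : List (List Int)) : PySem.Dict Int (List Int) :=
  (PySem.List.enumerate all_cliques).foldl
    (fun d p => (PySem.Set.ofList p.2).foldl (fun d x => d.modify x [] (· ++ [p.1])) d)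
    PySem.Dict.empty

-- counts[i] = counts.get(i, 0) + 1 over the postings of every distinct vertex of cur
-- (the iteration order over set(cur) / over the dicts never reaches the result: both dicts are only read back via get)
def pvCounts (index : PySem.Dict Int (List Int)) (cur : List Int) : PySem.Dict Int Int :=
  (PySem.Set.ofList cur).foldl
    (fun c x => (index.getD x []).foldl (fun c i => c.modify i 0 (· + 1)) c)
    PySem.Dict.empty

def pvLoopB (all_cliques : List (List Int)) (k : Int) (index : PySem.Dict Int (List Int)) :
    Nat → PySem.Set Int → List (List Int) → PySem.Set (List Int) → PySem.Set Int
  | 0, community, _, _ => community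
  | _ + 1, community, [], _ => community
  | fuel + 1, community, cur :: rest, visited =>
    let visited1 := PySem.Set.add visited cur
    let counts := pvCounts index cur
    -- for i, other in enumerate(all_cliques): if counts.get(i, 0) == k - 1 and tuple(other) not in visited: …
    let st := (PySem.List.enumerate all_cliques).foldl
      (fun (st : PySem.Set Int × List (List Int) × PySem.Set (List Int)) p =>
        if (counts.getD p.1 0 == k - 1) && !(PySem.Set.contains st.2.2 p.2)
        then (PySem.Set.update st.1 p.2, p.2 :: st.2.1, PySem.Set.add st.2.2 p.2)
        else st)
      (community, rest, visited1)
    pvLoopB all_cliques k index fuel st.1 st.2.1 st.2.2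

def roll_over_cliques_alt (G : Int) (start_clique : List Int) (all_cliques : List (List Int)) (visited : List (List Int)) (k : Int) : List Int :=
  pvLoopB all_cliques k (pvIndex all_cliques) (all_cliques.length + 1)
    (PySem.Set.ofList start_clique) [start_clique] visited

-- ===== PRECONDITION & SPEC =====
def Spec_roll_over_cliques (G : Int) (start_clique : List Int) (all_cliques : List (List Int)) (visited : List (List Int)) (k : Int) (out : List Int) : Prop := out = roll_over_cliques_alt G start_clique all_cliques visited k
instance (G : Int) (start_clique : List Int) (all_cliques : List (List Int)) (visited : List (List Int)) (k : Int) (out : List Int) : Decidable (Spec_roll_over_cliques G start_clique all_cliques visited k out) := by unfold Spec_roll_over_cliques; infer_instance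

-- ===== CLAIM (what is proved, stated in full; the proofs are below) =====
def Claim_equal_roll_over_cliques : Prop := ∀ (G : Int) (start_clique : List Int) (all_cliques : List (List Int)) (visited : List (List Int)) (k : Int), Dom_roll_over_cliques G start_clique all_cliques visited k → Spec_roll_over_cliques G start_clique all_cliques visited k (roll_over_cliques G start_clique all_cliques visited k)

-- ===== LEMMAS AND PROOFS =====

-- posting-list build, innermost loop: repeated modify at key x appends one copy of i per occurrence
lemma pvIdx_inner (S : List Int) (i : Int) (d : PySem.Dict Int (List Int)) (v : Int) :
    (S.foldl (fun d x => d.modify x [] (· ++ [i])) d).getD v []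
      = d.getD v [] ++ List.replicate (S.count v) i := by
  induction S generalizing d with
  | nil => simp
  | cons a S ih =>
    simp only [List.foldl_cons, ih, PySem.Dict.getD_modify, List.count_cons]
    by_cases hv : v = a
    · subst hv
      simp only [beq_self_eq_true, if_true, List.append_assoc, List.singleton_append,
        ← List.replicate_succ, List.replicate_succ']
    · simp [hv, Ne.symm hv]

-- the whole inverted index: postings of v are the indices of the pairs whose clique contains v
lemma pvIdx_getD (E : List (Int × List Int)) (d : PySem.Dict Int (List Int)) (v : Int) :
    (E.foldl (fun d p => (PySem.Set.ofList p.2).foldl (fun d x => d.modify x [] (· ++ [p.1])) d) d).getD v []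
      = d.getD v [] ++ (E.filter (fun p => decide (v ∈ p.2))).map (·.1) := by
  induction E generalizing d with
  | nil => simp
  | cons p E ih =>
    simp only [List.foldl_cons, ih, pvIdx_inner, List.filter_cons]
    by_cases hv : v ∈ p.2
    · have h1 : (PySem.Set.ofList p.2).count v = 1 :=
        List.count_eq_one_of_mem (PySem.Set.nodup_ofList p.2) ((PySem.Set.mem_ofList _ _).mpr hv)
      simp [hv, h1, List.append_assoc]
    · have h0 : (PySem.Set.ofList p.2).count v = 0 :=
        List.count_eq_zero_of_not_mem (fun hc => hv ((PySem.Set.mem_ofList _ _).mp hc))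
      simp [hv, h0]

-- the counting loop: counts.get(i, 0) sums, over the distinct vertices of cur, i's multiplicity in the postings
lemma pvCounts_general (index : PySem.Dict Int (List Int)) (L : List Int)
    (c0 : PySem.Dict Int Int) (i : Int) :
    (L.foldl (fun c x => (index.getD x []).foldl (fun c i => c.modify i 0 (· + 1)) c) c0).getD i 0
      = c0.getD i 0 + (L.map (fun x => ((index.getD x []).count i : Int))).sum := by
  induction L generalizing c0 with
  | nil => simp
  | cons a L ih =>
    simp only [List.foldl_cons, ih, PySem.Dict.getD_foldl_modify_add_one, List.map_cons,
      List.sum_cons]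
    ring

-- in the index built from enumerate, i = j occurs in v's postings exactly once iff v ∈ all[j]
lemma pvIdx_count (all : List (List Int)) (v : Int) (j : Nat) (hj : j < all.length) :
    ((pvIndex all).getD v []).count ((j : Nat) : Int)
      = if v ∈ all[j] then 1 else 0 := by
  have hx : (pvIndex all).getD v []
      = ((PySem.List.enumerate all).filter (fun p => decide (v ∈ p.2))).map (·.1) := by
    unfold pvIndex
    rw [pvIdx_getD]
    simp
  rw [hx]
  have hnd : (((PySem.List.enumerate all).filter (fun p => decide (v ∈ p.2))).map (·.1)).Nodup := by
    have hp := PySem.List.pairwise_lt_enumerate all (0 : Int)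
    have hpf := hp.filter (fun p => decide (v ∈ p.2))
    have : (((PySem.List.enumerate all).filter (fun p => decide (v ∈ p.2))).map (·.1)).Pairwise (· < ·) :=
      List.pairwise_map.mpr hpf
    exact this.imp (fun h => ne_of_lt h)
  have hmem : ((j : Nat) : Int) ∈ (((PySem.List.enumerate all).filter (fun p => decide (v ∈ p.2))).map (·.1))
      ↔ v ∈ all[j] := by
    simp only [List.mem_map, List.mem_filter]
    constructor
    · rintro ⟨p, ⟨hpe, hpv⟩, hp1⟩
      rcases (PySem.List.mem_enumerate_iff _ _ _).mp hpe with ⟨m, hm, rfl⟩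
      simp only [zero_add] at hp1 hpv
      have : m = j := by exact_mod_cast hp1
      subst this
      simpa using hpv
    · intro hv
      refine ⟨((j : Int), all[j]), ⟨?_, by simpa using hv⟩, rfl⟩
      exact (PySem.List.mem_enumerate_iff _ _ _).mpr ⟨j, hj, by simp⟩
  by_cases hv : v ∈ all[j]
  · rw [if_pos hv]
    exact List.count_eq_one_of_mem hnd (hmem.mpr hv)
  · rw [if_neg hv]
    exact List.count_eq_zero_of_not_mem (fun hc => hv (hmem.mp hc))

-- counts.get(j, 0) == the pairwise intersection size A computes
-- summing 0/1 indicators over a list is the length of the filtered list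
lemma pvSum_ite (L o : List Int) :
    (L.map (fun x => if x ∈ o then (1 : Int) else 0)).sum
      = ((L.filter (fun x => PySem.Set.contains o x)).length : Int) := by
  induction L with
  | nil => simp
  | cons a L ih =>
    by_cases h : a ∈ o
    · simp [h, ih]
      ring
    · simp [h, ih]

lemma pvCounts_getD (all : List (List Int)) (cur : List Int) (j : Nat) (hj : j < all.length) :
    (pvCounts (pvIndex all) cur).getD ((j : Nat) : Int) 0
      = ((PySem.Set.inter (PySem.Set.ofList cur) all[j]).length : Int) := by
  unfold pvCounts
  rw [pvCounts_general]
  have h1 : (PySem.Set.ofList cur).map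
        (fun x => ((((pvIndex all).getD x []).count ((j : Nat) : Int) : Nat) : Int))
      = (PySem.Set.ofList cur).map (fun x => if x ∈ all[j] then (1 : Int) else 0) :=
    List.map_congr_left (fun x _ => by rw [pvIdx_count all x j hj]; split <;> simp)
  rw [h1, pvSum_ite]
  simp [PySem.Set.inter]

-- a fold over enumerate whose function ignores the position is a fold over the list
lemma pvFoldl_enumerate_snd {β : Type} (xs : List (List Int)) (f : β → List Int → β) :
    ∀ (s : Int) (init : β),
      (PySem.List.enumerate xs s).foldl (fun st p => f st p.2) init = xs.foldl f init := by
  induction xs with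
  | nil => intro s init; rfl
  | cons a xs ih =>
    intro s init
    simp only [PySem.List.enumerate_cons, List.foldl_cons]
    exact ih (s + 1) _

-- one body of the traversal loop: A's collect-then-process pass equals B's counter-driven pass
lemma pvBody_eq (all : List (List Int)) (k : Int) (cur : List Int)
    (init : PySem.Set Int × List (List Int) × PySem.Set (List Int)) :
    ((all.foldl (fun acc other =>
        if (((PySem.Set.inter (PySem.Set.ofList cur) other).length : Int) == k - 1)
        then acc ++ [other] else acc) []).foldl
      (fun (st : PySem.Set Int × List (List Int) × PySem.Set (List Int)) adj =>
        if PySem.Set.contains st.2.2 adj then st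
        else (PySem.Set.update st.1 adj, adj :: st.2.1, PySem.Set.add st.2.2 adj)) init)
    = ((PySem.List.enumerate all).foldl
      (fun (st : PySem.Set Int × List (List Int) × PySem.Set (List Int)) p =>
        if ((pvCounts (pvIndex all) cur).getD p.1 0 == k - 1) && !(PySem.Set.contains st.2.2 p.2)
        then (PySem.Set.update st.1 p.2, p.2 :: st.2.1, PySem.Set.add st.2.2 p.2)
        else st) init) := by
  rw [PySem.List.foldl_append_if_eq_filter, List.nil_append, List.foldl_filter]
  have h1 : (PySem.List.enumerate all).foldl
      (fun (st : PySem.Set Int × List (List Int) × PySem.Set (List Int)) p =>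
        if ((pvCounts (pvIndex all) cur).getD p.1 0 == k - 1) && !(PySem.Set.contains st.2.2 p.2)
        then (PySem.Set.update st.1 p.2, p.2 :: st.2.1, PySem.Set.add st.2.2 p.2)
        else st) init
    = (PySem.List.enumerate all).foldl
      (fun (st : PySem.Set Int × List (List Int) × PySem.Set (List Int)) p =>
        if (((PySem.Set.inter (PySem.Set.ofList cur) p.2).length : Int) == k - 1)
        then (if PySem.Set.contains st.2.2 p.2 then st
              else (PySem.Set.update st.1 p.2, p.2 :: st.2.1, PySem.Set.add st.2.2 p.2))
        else st) init := by
    apply PySem.List.foldl_congr_mem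
    intro st p hp
    rcases (PySem.List.mem_enumerate_iff _ _ _).mp hp with ⟨m, hm, rfl⟩
    simp only [zero_add]
    rw [pvCounts_getD all cur m hm]
    by_cases ha : ((((PySem.Set.inter (PySem.Set.ofList cur) all[m]).length : Nat) : Int) == k - 1)
    · by_cases hb : PySem.Set.contains st.2.2 all[m] <;> simp [ha, hb]
    · simp [ha]
  rw [h1]
  exact (pvFoldl_enumerate_snd all
    (fun (st : PySem.Set Int × List (List Int) × PySem.Set (List Int)) o =>
      if (((PySem.Set.inter (PySem.Set.ofList cur) o).length : Int) == k - 1)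
      then (if PySem.Set.contains st.2.2 o then st
            else (PySem.Set.update st.1 o, o :: st.2.1, PySem.Set.add st.2.2 o))
      else st) 0 init).symm

lemma pvLoop_eq (all : List (List Int)) (k : Int) :
    ∀ (fuel : Nat) (comm : PySem.Set Int) (stack : List (List Int)) (vis : PySem.Set (List Int)),
    pvLoopA all k fuel comm stack vis = pvLoopB all k (pvIndex all) fuel comm stack vis := by
  intro fuel
  induction fuel with
  | zero => intro comm stack vis; rfl
  | succ n ih =>
    intro comm stack vis
    cases stack with
    | nil => rfl
    | cons cur rest =>
      simp only [pvLoopA, pvLoopB]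
      rw [pvBody_eq]
      apply ih

-- ===== VERDICT (by name: the statement is the Claim_ definition above) =====
theorem roll_over_cliques_spec : Claim_equal_roll_over_cliques := by
  intro G start_clique all_cliques visited k _
  unfold Spec_roll_over_cliques roll_over_cliques roll_over_cliques_alt
  exact pvLoop_eq all_cliques k _ _ _ _
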